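-- pv_equiv track=rewrite | github.com/chojaelong/CodingTest | code/프로그래머스/더맵게.py | solution
-- ===== SOURCE A (Python) =====
-- import heapq
--
-- def solution(scoville, K):
--     count = 0
--     scoville_condition = [False] * len(scoville)
--
--     for i in range(len(scoville)):
--         if scoville[i] >= K:
--             scoville_condition[i] = True
--
--     dismatch = scoville_condition.count(False)
--
--     heapq.heapify(scoville)
--
--     while dismatch > 0:
--         if len(scoville) == 0 or len(scoville) == 1:
--             return -1
--         a = heapq.heappop(scoville)
--         b = heapq.heappop(scoville)
--         dismatch -= 2
--         new_scoville = a + (b * 2)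
--         heapq.heappush(scoville, new_scoville)
--         if new_scoville < K:
--             dismatch += 1
--
--         count += 1
--
--     return count
-- ===== SOURCE B (Python) =====
-- def solution(scoville, K):
--     xs = sorted(scoville)
--     count = 0
--     while xs and xs[0] < K:
--         if len(xs) == 1:
--             return -1
--         new = xs[0] + 2 * xs[1]
--         rest = xs[2:]
--         i = 0
--         while i < len(rest) and rest[i] < new:
--             i += 1
--         rest.insert(i, new)
--         xs = rest
--         count += 1
--     return count
-- ===== Notes on version B (the rewrite author's own statement) =====
-- stated objective: simpler
-- what changed: B drops A's below-K boolean pass and the dismatch counter entirely and replaces the heap by a sorted list: it sorts once and then loops while the smallest element is below K, combining the two smallest and inserting the mix back in sorted position, so completion is decided by peeking the minimum instead of by counter bookkeeping.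
-- outside the precondition, e.g. on solution([-100, 10], 5): A returns 1, B returns -1; on solution([-5, -3], -4): A returns 1, B returns -1
import Mathlib
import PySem

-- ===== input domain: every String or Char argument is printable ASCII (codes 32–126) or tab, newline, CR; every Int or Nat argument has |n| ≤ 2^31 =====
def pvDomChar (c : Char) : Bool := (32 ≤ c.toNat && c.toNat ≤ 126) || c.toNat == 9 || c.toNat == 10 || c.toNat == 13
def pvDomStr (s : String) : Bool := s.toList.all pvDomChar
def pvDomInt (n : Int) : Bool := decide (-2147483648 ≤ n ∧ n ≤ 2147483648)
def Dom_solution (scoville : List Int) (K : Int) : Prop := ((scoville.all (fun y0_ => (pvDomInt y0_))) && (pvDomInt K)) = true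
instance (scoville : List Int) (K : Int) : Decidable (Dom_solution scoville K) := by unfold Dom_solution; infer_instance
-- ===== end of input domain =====

-- B replaces A's below-K boolean pass, dismatch counter and heap by a sorted list driven
-- by peeking the minimum (objective: simpler). Python A heapifies/pops the input list in
-- place; the equivalence proved here is about the return value only.

-- ===== PORT A =====
-- heapq.heappop modelled on the multiset: return the minimum, remove one occurrence.
def pvHeapPop (l : List Int) : Int × List Int :=
  match PySem.List.min? l (fun x => x) with
  | none => (0, [])          -- unreachable: callers guard on length ≥ 2
  | some m => (m, l.erase m)

lemma pvHeapPop_length_lt (l : List Int) (hl : l ≠ []) :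
    (pvHeapPop l).2.length < l.length := by
  unfold pvHeapPop
  cases h : PySem.List.min? l (fun x => x) with
  | none => exact absurd ((PySem.List.min?_eq_none_iff _ _).mp h) hl
  | some m =>
    have hm : m ∈ l := PySem.List.min?_mem h
    have hlen : l.length ≠ 0 := by simpa [List.length_eq_zero_iff] using hl
    simp [List.length_erase_of_mem hm]
    omega

-- the while-loop of A: state (heap, dismatch, count)
def pvLoopA (heap : List Int) (dismatch : Int) (count : Int) (K : Int) : Int :=
  if dismatch > 0 then
    if _hg : heap.length = 0 ∨ heap.length = 1 then -1
    else
      let p1 := pvHeapPop heap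
      let p2 := pvHeapPop p1.2
      let nw := p1.1 + p2.1 * 2
      pvLoopA (nw :: p2.2) (dismatch - 2 + (if nw < K then 1 else 0)) (count + 1) K
  else count
termination_by heap.length
decreasing_by
  have hlen2 : 2 ≤ heap.length := by omega
  have hne : heap ≠ [] := by
    intro h; rw [h] at hlen2; simp at hlen2
  have l1 := pvHeapPop_length_lt heap hne
  by_cases h2 : (pvHeapPop heap).2 = []
  · have : pvHeapPop (pvHeapPop heap).2 = (0, []) := by rw [h2]; rfl
    simp only [this, List.length_cons, List.length_nil]
    omega
  · have l2 := pvHeapPop_length_lt (pvHeapPop heap).2 h2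
    simp only [List.length_cons]
    omega

def solution (scoville : List Int) (K : Int) : Int :=
  let cond := scoville.map (fun x => decide (K ≤ x))   -- scoville_condition after the for-loop
  let dismatch : Int := (cond.count false : Nat)
  pvLoopA scoville dismatch 0 K

-- ===== PORT B =====
-- the inner while of B: linear scan inserting `v` before the first element ≥ v
def pvInsertAsc (v : Int) : List Int → List Int
  | [] => [v]
  | x :: t => if x < v then x :: pvInsertAsc v t else v :: x :: t

lemma pvInsertAsc_length (v : Int) (l : List Int) :
    (pvInsertAsc v l).length = l.length + 1 := by
  induction l with
  | nil => rfl
  | cons x t ih => by_cases h : x < v <;> simp [pvInsertAsc, h, ih]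

-- the outer while of B: xs is kept sorted ascending
def pvLoopB (xs : List Int) (count : Int) (K : Int) : Int :=
  match xs with
  | [] => count
  | a :: rest =>
    if a < K then
      match rest with
      | [] => -1
      | b :: rest2 => pvLoopB (pvInsertAsc (a + 2 * b) rest2) (count + 1) K
    else count
termination_by xs.length
decreasing_by simp [pvInsertAsc_length]

def solution_alt (scoville : List Int) (K : Int) : Int :=
  pvLoopB (PySem.List.sorted scoville (fun x => x) false) 0 K

-- ===== PRECONDITION & SPEC =====
-- Pre_ excludes lists containing a negative scoville value (scoville scores are nonnegative
-- in the problem): there A's dismatch counter can miscount (a + 2*b can fall below K although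
-- b ≥ K) and A reports success while elements below K remain, an artefact B does not share.
def Pre_solution (scoville : List Int) (K : Int) : Prop := ∀ x ∈ scoville, 0 ≤ x
instance (scoville : List Int) (K : Int) : Decidable (Pre_solution scoville K) := by unfold Pre_solution; infer_instance
def pvWitness_solution : List Int × Int := ([1, 2, 3, 9, 10, 12], 7)

def Spec_solution (scoville : List Int) (K : Int) (out : Int) : Prop := out = solution_alt scoville K
instance (scoville : List Int) (K : Int) (out : Int) : Decidable (Spec_solution scoville K out) := by unfold Spec_solution; infer_instance

-- ===== CLAIM (what is proved, stated in full; the proofs are below) =====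
def Claim_equal_solution : Prop := ∀ (scoville : List Int) (K : Int), Dom_solution scoville K → Pre_solution scoville K → Spec_solution scoville K (solution scoville K)

-- ===== LEMMAS AND PROOFS =====

-- number of elements strictly below K, as an Int
def pvBelow (l : List Int) (K : Int) : Int := (l.countP (fun x => decide (x < K)) : Nat)

lemma pvBelow_perm {l l' : List Int} (K : Int) (h : l.Perm l') : pvBelow l K = pvBelow l' K := by
  simp [pvBelow, h.countP_eq]

lemma pvBelow_nonneg (l : List Int) (K : Int) : 0 ≤ pvBelow l K := by
  simp [pvBelow]

lemma pvBelow_cons (x : Int) (l : List Int) (K : Int) :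
    pvBelow (x :: l) K = (if x < K then 1 else 0) + pvBelow l K := by
  by_cases h : x < K <;> simp [pvBelow, h] <;> push_cast <;> ring

lemma pvBelow_eq_zero_iff (l : List Int) (K : Int) :
    pvBelow l K = 0 ↔ ∀ x ∈ l, ¬ x < K := by
  simp [pvBelow, List.countP_eq_zero]

-- min-fronting: sorted l = min :: sorted (l.erase min)
lemma sorted_cons_min (l : List Int) (m : Int)
    (hm : PySem.List.min? l (fun x => x) = some m) :
    PySem.List.sorted l (fun x => x) false = m :: PySem.List.sorted (l.erase m) (fun x => x) false := by
  have hmem : m ∈ l := PySem.List.min?_mem hm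
  have hmin : ∀ y ∈ l, m ≤ y := fun y hy => PySem.List.min?_isMin hm y hy
  apply PySem.List.sorted_id_eq_of_perm_of_pairwise
  · exact ((PySem.List.sorted_perm (l.erase m) (fun x => x) false).cons m).trans
      (List.perm_cons_erase hmem).symm
  · refine List.pairwise_cons.mpr ⟨?_, ?_⟩
    · intro y hy
      have : y ∈ l.erase m := (PySem.List.mem_sorted _ _ _ _).mp hy
      exact hmin y (List.mem_of_mem_erase this)
    · exact PySem.List.sorted_pairwise (l.erase m) (fun x => x)

-- B's linear insertion into a sorted list is Python's sorted() of the pushed multiset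
lemma pvInsertAsc_perm (v : Int) (l : List Int) : (pvInsertAsc v l).Perm (v :: l) := by
  induction l with
  | nil => rfl
  | cons x t ih =>
    by_cases h : x < v
    · simpa [pvInsertAsc, h] using ((ih.cons x).trans (List.Perm.swap v x t))
    · simp [pvInsertAsc, h]

lemma pvInsertAsc_pairwise (v : Int) (l : List Int) (hl : l.Pairwise (· ≤ ·)) :
    (pvInsertAsc v l).Pairwise (· ≤ ·) := by
  induction l with
  | nil => simp [pvInsertAsc]
  | cons x t ih =>
    rcases List.pairwise_cons.mp hl with ⟨hx, ht⟩
    by_cases h : x < v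
    · simp only [pvInsertAsc, if_pos h]
      refine List.pairwise_cons.mpr ⟨?_, ih ht⟩
      intro y hy
      have : y ∈ v :: t := (pvInsertAsc_perm v t).mem_iff.mp hy
      rcases List.mem_cons.mp this with rfl | hyt
      · exact le_of_lt h
      · exact hx y hyt
    · simp only [pvInsertAsc, if_neg h]
      refine List.pairwise_cons.mpr ⟨?_, hl⟩
      intro y hy
      rcases List.mem_cons.mp hy with rfl | hyt
      · omega
      · exact le_trans (by omega) (hx y hyt)

lemma sorted_push (v : Int) (l : List Int) :
    PySem.List.sorted (v :: l) (fun x => x) false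
      = pvInsertAsc v (PySem.List.sorted l (fun x => x) false) := by
  apply PySem.List.sorted_id_eq_of_perm_of_pairwise
  · exact (pvInsertAsc_perm v _).trans ((PySem.List.sorted_perm l (fun x => x) false).cons v)
  · exact pvInsertAsc_pairwise v _ (PySem.List.sorted_pairwise l (fun x => x))

-- pvLoopB returns immediately when nothing is below K
lemma pvLoopB_done (xs : List Int) (count K : Int) (h : ∀ x ∈ xs, ¬ x < K) :
    pvLoopB xs count K = count := by
  cases xs with
  | nil => rw [pvLoopB]
  | cons a rest => rw [pvLoopB.eq_def]; simp [h a (by simp)]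

lemma pvLoopB_one (a count K : Int) (h : a < K) : pvLoopB [a] count K = -1 := by
  rw [pvLoopB.eq_def]; simp [h]

lemma pvLoopB_step (a b : Int) (t : List Int) (count K : Int) (h : a < K) :
    pvLoopB (a :: b :: t) count K = pvLoopB (pvInsertAsc (a + 2 * b) t) (count + 1) K := by
  rw [pvLoopB.eq_def]; simp [h]

-- the main invariant: A's loop with an accurate dismatch equals B's loop on the sorted multiset
lemma loopA_eq_loopB (n : Nat) : ∀ (heap : List Int) (count K : Int),
    heap.length ≤ n → (∀ x ∈ heap, 0 ≤ x) →
    pvLoopA heap (pvBelow heap K) count K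
      = pvLoopB (PySem.List.sorted heap (fun x => x) false) count K := by
  induction n with
  | zero =>
    intro heap count K hn _
    have : heap = [] := by simpa [List.length_eq_zero_iff] using Nat.le_zero.mp hn
    subst this
    simp [pvLoopA, pvLoopB, pvBelow, PySem.List.sorted]
  | succ n ih =>
    intro heap count K hn hnn
    by_cases hpos : pvBelow heap K > 0
    · -- some element is below K
      have hne : heap ≠ [] := by
        intro h; subst h; simp [pvBelow] at hpos
      obtain ⟨a, ha⟩ : ∃ a, PySem.List.min? heap (fun x => x) = some a := by
        cases h : PySem.List.min? heap (fun x => x) with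
        | none => exact absurd ((PySem.List.min?_eq_none_iff _ _).mp h) hne
        | some a => exact ⟨a, rfl⟩
      have hamem : a ∈ heap := PySem.List.min?_mem ha
      have hamin : ∀ y ∈ heap, a ≤ y := fun y hy => PySem.List.min?_isMin ha y hy
      have haK : a < K := by
        by_contra hge
        have : pvBelow heap K = 0 := (pvBelow_eq_zero_iff heap K).mpr
          (fun x hx hlt => hge (lt_of_le_of_lt (hamin x hx) hlt))
        omega
      have hsorted : PySem.List.sorted heap (fun x => x) false
          = a :: PySem.List.sorted (heap.erase a) (fun x => x) false := sorted_cons_min heap a ha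
      by_cases hlen1 : heap.length = 1
      · -- singleton: both return -1
        have he : heap.erase a = [] := by
          have := List.length_erase_of_mem hamem
          rw [hlen1] at this
          simpa [List.length_eq_zero_iff] using this
        rw [pvLoopA, if_pos hpos, dif_pos (Or.inr hlen1), hsorted, he,
          show PySem.List.sorted ([] : List Int) (fun x => x) false = [] from rfl]
        exact (pvLoopB_one a count K haK).symm
      · -- length ≥ 2: pop a, pop b, push a + 2b
        have hlen2 : 2 ≤ heap.length := by
          have : heap.length ≠ 0 := by simpa [List.length_eq_zero_iff] using hne
          omega
        have hne1 : heap.erase a ≠ [] := by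
          have := List.length_erase_of_mem hamem
          intro h; rw [h] at this; simp at this; omega
        obtain ⟨b, hb⟩ : ∃ b, PySem.List.min? (heap.erase a) (fun x => x) = some b := by
          cases h : PySem.List.min? (heap.erase a) (fun x => x) with
          | none => exact absurd ((PySem.List.min?_eq_none_iff _ _).mp h) hne1
          | some b => exact ⟨b, rfl⟩
        have hbmem : b ∈ heap.erase a := PySem.List.min?_mem hb
        have hbmin : ∀ y ∈ heap.erase a, b ≤ y := fun y hy => PySem.List.min?_isMin hb y hy
        have hab : a ≤ b := hamin b (List.mem_of_mem_erase hbmem)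
        set h2 := (heap.erase a).erase b with hh2
        have hperm : heap.Perm (a :: b :: h2) :=
          (List.perm_cons_erase hamem).trans ((List.perm_cons_erase hbmem).cons a)
        have hb0 : 0 ≤ b := hnn b (List.mem_of_mem_erase hbmem)
        have ha0 : 0 ≤ a := hnn a hamem
        have hnn2 : ∀ x ∈ h2, 0 ≤ x := fun x hx =>
          hnn x (List.mem_of_mem_erase (List.mem_of_mem_erase hx))
        have hlen2' : h2.length = heap.length - 2 := by
          rw [hh2]
          have e1 := List.length_erase_of_mem hamem
          have e2 := List.length_erase_of_mem hbmem
          omega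
        -- unfold one step of A
        have hguard : ¬ (heap.length = 0 ∨ heap.length = 1) := by omega
        rw [pvLoopA, if_pos hpos, dif_neg hguard]
        have hpop1 : pvHeapPop heap = (a, heap.erase a) := by simp [pvHeapPop, ha]
        have hpop2 : pvHeapPop (heap.erase a) = (b, h2) := by rw [hh2]; simp [pvHeapPop, hb]
        simp only [hpop1, hpop2]
        -- unfold one step of B
        have hsorted2 : PySem.List.sorted (heap.erase a) (fun x => x) false
            = b :: PySem.List.sorted h2 (fun x => x) false := sorted_cons_min _ b hb
        rw [hsorted, hsorted2, pvLoopB_step a b _ count K haK]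
        have hins : pvInsertAsc (a + 2 * b) (PySem.List.sorted h2 (fun x => x) false)
            = PySem.List.sorted ((a + b * 2) :: h2) (fun x => x) false := by
          rw [sorted_push]
          ring_nf
        rw [hins]
        have hcnt : pvBelow heap K = (if a < K then 1 else 0) + ((if b < K then 1 else 0) + pvBelow h2 K) := by
          rw [pvBelow_perm K hperm, pvBelow_cons, pvBelow_cons]
        by_cases hbK : b < K
        · -- accurate bookkeeping: dismatch stays the below-K count
          have harith : pvBelow heap K - 2 + (if a + b * 2 < K then 1 else 0)
              = pvBelow ((a + b * 2) :: h2) K := by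
            rw [hcnt, pvBelow_cons]
            simp [haK, hbK]
            ring
          rw [harith]
          exact ih ((a + b * 2) :: h2) (count + 1) K (by simp; omega) (by
            intro x hx
            rcases List.mem_cons.mp hx with rfl | hx2
            · omega
            · exact hnn2 x hx2)
        · -- b ≥ K: dismatch goes nonpositive and both sides stop after this combine
          have hK0 : 0 < K := by omega
          have hnwK : ¬ a + b * 2 < K := by omega
          have hd : pvBelow heap K - 2 + (if a + b * 2 < K then 1 else 0) = -1 := by
            have h20 : pvBelow h2 K = 0 := (pvBelow_eq_zero_iff h2 K).mpr (by
              intro x hx hlt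
              exact absurd (lt_of_le_of_lt (hbmin x (List.mem_of_mem_erase hx)) hlt) hbK)
            rw [hcnt]
            simp [haK, hbK, hnwK, h20]
          rw [hd, pvLoopA]
          simp only [show ¬ ((-1 : Int) > 0) by omega, if_neg, not_false_iff]
          refine (pvLoopB_done _ _ _ ?_).symm
          intro x hx hlt
          have : x ∈ (a + b * 2) :: h2 := by
            have := (PySem.List.sorted_perm ((a + b * 2) :: h2) (fun x => x) false).mem_iff.mp hx
            exact this
          rcases List.mem_cons.mp this with rfl | hx2
          · omega
          · exact absurd (lt_of_le_of_lt (hbmin x (List.mem_of_mem_erase hx2)) hlt) hbK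
    · -- nothing (counted) below K: A returns count, and indeed nothing is below K
      have hz : pvBelow heap K = 0 := le_antisymm (by omega) (pvBelow_nonneg heap K)
      have hnone : ∀ x ∈ heap, ¬ x < K := (pvBelow_eq_zero_iff heap K).mp hz
      rw [pvLoopA]
      simp only [hpos, if_neg, not_false_iff]
      refine (pvLoopB_done _ _ _ ?_).symm
      intro x hx
      exact hnone x ((PySem.List.mem_sorted _ _ _ _).mp hx)

-- A's initial dismatch is the below-K count
lemma solution_eq_loopA (scoville : List Int) (K : Int) :
    solution scoville K = pvLoopA scoville (pvBelow scoville K) 0 K := by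
  have h : (scoville.map (fun x => decide (K ≤ x))).count false
      = scoville.countP (fun x => decide (x < K)) := by
    simp only [List.count, List.countP_map]
    apply List.countP_congr
    intro x _
    by_cases hx : K ≤ x
    · simp [hx, show ¬ x < K from by omega]
    · simp [hx, show x < K from by omega]
  show pvLoopA scoville (((scoville.map (fun x => decide (K ≤ x))).count false : Nat) : Int) 0 K = _
  rw [h]
  rfl

-- ===== VERDICT (by name: the statement is the Claim_ definition above) =====
theorem solution_spec : Claim_equal_solution := by
  intro scoville K _ hpre
  unfold Spec_solution solution_alt
  rw [solution_eq_loopA]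
  exact loopA_eq_loopB scoville.length scoville 0 K le_rfl hpre
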